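-- pv_equiv track=rewrite | github.com/oscarys/logic_design_tool | simulation/fsm_engine.py | _label_matches
-- ===== SOURCE A (Python) =====
-- def _label_matches(label: str, current: str) -> bool:
--     """
--     Match a hexagon exit label against the current input combination.
--     Labels may contain 'X' as don't-care, and are space- or no-separator.
--     current is a space-separated string of bit values.
--     """
--     label_bits   = label.replace(" ", "")
--     current_bits = current.replace(" ", "")
--
--     if len(label_bits) != len(current_bits):
--         return False
--
--     for lb, cb in zip(label_bits, current_bits):
--         if lb.upper() == "X":
--             continue
--         if lb != cb:
--             return False
--     return True
-- ===== SOURCE B (Python) =====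
-- import re
--
-- def _label_matches(label: str, current: str) -> bool:
--     """Compile the label into a regex: don't-care 'X'/'x' -> '.', everything
--     else escaped literally; fullmatch enforces equal length by itself."""
--     pattern = ''.join('.' if ch in 'Xx' else re.escape(ch)
--                       for ch in label.replace(' ', ''))
--     return re.fullmatch(pattern, current.replace(' ', ''), flags=re.DOTALL) is not None
-- ===== Notes on version B (the rewrite author's own statement) =====
-- stated objective: idiomatic
-- what changed: A strips both strings, checks lengths, then loops position by position with a wildcard branch; B compiles the stripped label into a regular expression ('.' for each don't-care, re.escape for everything else) and delegates the whole comparison, including the length check, to a single re.fullmatch.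
import Mathlib
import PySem

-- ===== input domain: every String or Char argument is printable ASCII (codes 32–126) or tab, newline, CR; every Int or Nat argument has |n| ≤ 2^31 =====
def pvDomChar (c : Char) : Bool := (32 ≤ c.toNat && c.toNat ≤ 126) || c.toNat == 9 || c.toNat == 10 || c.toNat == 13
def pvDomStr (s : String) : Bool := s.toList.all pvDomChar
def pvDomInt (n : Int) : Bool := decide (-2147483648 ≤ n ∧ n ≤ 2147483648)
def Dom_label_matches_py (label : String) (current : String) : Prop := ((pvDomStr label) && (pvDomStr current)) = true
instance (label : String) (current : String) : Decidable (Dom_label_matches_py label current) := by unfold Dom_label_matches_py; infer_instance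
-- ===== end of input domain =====

-- B compiles the stripped label into a regex ('.' per don't-care, re.escape otherwise)
-- and delegates the comparison to one fullmatch (objective: idiomatic, same cost).

-- ===== PORT A =====
-- the for-loop over zip(label_bits, current_bits) with its early returns
def pvALoop : List (Char × Char) → Bool
  | [] => true
  | (lb, cb) :: rest =>
    if PySem.Chars.upper [lb] = ['X'] then pvALoop rest
    else if lb ≠ cb then false
    else pvALoop rest

def label_matches_py (label : String) (current : String) : Bool :=
  let label_bits := PySem.Chars.replace label.toList [' '] []
  let current_bits := PySem.Chars.replace current.toList [' '] []
  if label_bits.length ≠ current_bits.length then false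
  else pvALoop (label_bits.zip current_bits)

-- ===== PORT B =====
-- re.escape: exactly the characters Python 3 re.escape prefixes with '\' within the
-- printable-ASCII + tab/newline/CR domain (checked against CPython's _special_chars_map)
def pvSpecial : List Char :=
  [' ', '#', '$', '&', '(', ')', '*', '+', '-', '.', '?', '[', '\\', ']', '^', '{', '|', '}', '~', '\t', '\n', '\r']

def pvEsc (c : Char) : List Char := if c ∈ pvSpecial then ['\\', c] else [c]

-- ''.join('.' if ch in 'Xx' else re.escape(ch) for ch in <stripped label>)
def pvPat : List Char → List Char
  | [] => []
  | c :: cs => (if c = 'X' ∨ c = 'x' then ['.'] else pvEsc c) ++ pvPat cs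

-- hand port of re.fullmatch (with DOTALL) restricted to the pattern class pvPat emits:
-- literal chars, '\'-escaped literal chars, and '.' matching any one char — exact on
-- that class: each token consumes exactly one subject char, fullmatch needs the whole subject
def pvFullmatch : List Char → List Char → Bool
  | [], s => s.isEmpty
  | p :: ps, s =>
    if p = '\\' then
      match ps, s with
      | c :: ps', d :: ds => if d = c then pvFullmatch ps' ds else false
      | _, _ => false
    else
      match s with
      | [] => false
      | d :: ds =>
        if p = '.' then pvFullmatch ps ds
        else if d = p then pvFullmatch ps ds else false

def label_matches_py_alt (label : String) (current : String) : Bool :=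
  pvFullmatch (pvPat (PySem.Chars.replace label.toList [' '] []))
    (PySem.Chars.replace current.toList [' '] [])

-- ===== PRECONDITION & SPEC =====
def Spec_label_matches_py (label : String) (current : String) (out : Bool) : Prop := out = label_matches_py_alt label current
instance (label : String) (current : String) (out : Bool) : Decidable (Spec_label_matches_py label current out) := by unfold Spec_label_matches_py; infer_instance

-- ===== CLAIM =====
def Claim_equal_label_matches_py : Prop := ∀ (label : String) (current : String), Dom_label_matches_py label current → Spec_label_matches_py label current (label_matches_py label current)

-- ===== LEMMAS AND PROOFS =====

-- replace(s, " ", "") is exactly the filter that drops spaces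
theorem pv_replace_go_filter (fuel : Nat) :
    ∀ (l acc : List Char), l.length ≤ fuel →
      PySem.Chars.replace.go [' '] [] fuel l acc = acc.reverse ++ l.filter (· ≠ ' ') := by
  induction fuel with
  | zero =>
    intro l acc h
    have : l = [] := List.eq_nil_of_length_eq_zero (Nat.le_zero.mp h)
    subst this
    simp [PySem.Chars.replace.go]
  | succ n ih =>
    intro l acc h
    cases l with
    | nil => simp [PySem.Chars.replace.go]
    | cons c t =>
      simp only [PySem.Chars.replace.go]
      by_cases hc : c = ' '
      · subst hc
        rw [if_pos (by simp [List.isPrefixOf])]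
        simp only [List.length_nil, List.length_cons, Nat.zero_add, List.drop_succ_cons,
          List.drop_zero, List.reverse_nil, List.nil_append] at h ⊢
        rw [ih t acc (by omega)]
        simp
      · rw [if_neg (by simp [List.isPrefixOf, Ne.symm hc])]
        rw [ih t (c :: acc) (by simpa using Nat.le_of_succ_le_succ h)]
        simp [hc]

theorem pv_replace_filter (s : List Char) :
    PySem.Chars.replace s [' '] [] = s.filter (· ≠ ' ') := by
  have := pv_replace_go_filter s.length s [] (le_refl _)
  simpa [PySem.Chars.replace] using this

theorem pv_toNat_ofNat (n : Nat) (h : n < 55296) : (Char.ofNat n).toNat = n := by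
  unfold Char.ofNat
  rw [dif_pos (Or.inl h)]
  rfl

theorem pv_upperChar_X_iff (l : Char) : PySem.Chars.upperChar l = 'X' ↔ l = 'X' ∨ l = 'x' := by
  constructor
  · intro h
    unfold PySem.Chars.upperChar PySem.Chars.islower at h
    by_cases hlow : (decide ('a' ≤ l) && decide (l ≤ 'z')) = true
    · rw [if_pos hlow] at h
      simp only [Bool.and_eq_true, decide_eq_true_eq, Char.le_def,
        UInt32.le_iff_toNat_le] at hlow
      obtain ⟨hb1, hb2⟩ := hlow
      have e1 : ('a' : Char).val.toNat = 97 := by decide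
      have e2 : ('z' : Char).val.toNat = 122 := by decide
      rw [e1] at hb1
      rw [e2] at hb2
      have hlt : l.toNat = l.val.toNat := rfl
      have h88 : (Char.ofNat (l.toNat - 32)).toNat = ('X' : Char).toNat := congrArg Char.toNat h
      rw [pv_toNat_ofNat _ (by rw [hlt]; omega)] at h88
      have e3 : ('X' : Char).toNat = 88 := by decide
      rw [e3] at h88
      have hfin : l.toNat = ('x' : Char).toNat := by
        have e4 : ('x' : Char).toNat = 120 := by decide
        rw [e4]
        rw [hlt] at h88 ⊢
        omega
      exact Or.inr (Char.ext (UInt32.toNat_inj.mp hfin))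
    · rw [if_neg hlow] at h
      exact Or.inl h
  · rintro (rfl | rfl) <;> decide

-- the canonical form A reduces to on the space-free lists
def pvMid (L C : List Char) : Bool :=
  if L.length ≠ C.length then false else pvALoop (L.zip C)

theorem pv_A_eq_mid (label current : String) :
    label_matches_py label current
      = pvMid (label.toList.filter (· ≠ ' ')) (current.toList.filter (· ≠ ' ')) := by
  simp only [label_matches_py, pvMid, pv_replace_filter]

theorem pv_aloop_step (l cb : Char) (r : List (Char × Char)) :
    pvALoop ((l, cb) :: r)
      = if l = 'X' ∨ l = 'x' then pvALoop r else if l ≠ cb then false else pvALoop r := by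
  have hiff : (PySem.Chars.upper [l] = ['X']) ↔ (l = 'X' ∨ l = 'x') := by
    simpa [PySem.Chars.upper] using pv_upperChar_X_iff l
  by_cases hx : l = 'X' ∨ l = 'x'
  · rw [if_pos hx]
    simp only [pvALoop]
    rw [if_pos (hiff.mpr hx)]
  · rw [if_neg hx]
    simp only [pvALoop]
    rw [if_neg (fun hh => hx (hiff.mp hh))]

theorem pvMid_cons (l c : Char) (L C : List Char) :
    pvMid (l :: L) (c :: C)
      = if l = 'X' ∨ l = 'x' then pvMid L C else if l ≠ c then false else pvMid L C := by
  simp only [pvMid, List.zip_cons_cons, pv_aloop_step, List.length_cons]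
  by_cases hlen : L.length = C.length
  · simp only [hlen, ne_eq, not_true_eq_false, if_false]
  · have : ¬ (L.length + 1 = C.length + 1) := by omega
    simp only [ne_eq, this, not_false_eq_true, if_true]
    split_ifs <;> simp

-- matching an escaped-or-literal single-char token consumes exactly that char
theorem pv_full_esc_nil (l : Char) (ps : List Char) :
    pvFullmatch (pvEsc l ++ ps) [] = false := by
  by_cases hsp : l ∈ pvSpecial
  · simp only [pvEsc, if_pos hsp, List.cons_append, List.nil_append]
    rw [pvFullmatch.eq_def]
    simp
  · have hb : l ≠ '\\' := by intro h; subst h; exact hsp (by decide)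
    simp only [pvEsc, if_neg hsp, List.cons_append, List.nil_append]
    rw [pvFullmatch.eq_def]
    simp [hb]

theorem pv_full_esc_cons (l : Char) (ps ds : List Char) (d : Char) :
    pvFullmatch (pvEsc l ++ ps) (d :: ds) = if d = l then pvFullmatch ps ds else false := by
  by_cases hsp : l ∈ pvSpecial
  · simp only [pvEsc, if_pos hsp, List.cons_append, List.nil_append]
    rw [pvFullmatch.eq_def]
    simp
  · have hb : l ≠ '\\' := by intro h; subst h; exact hsp (by decide)
    have hd : l ≠ '.' := by intro h; subst h; exact hsp (by decide)
    simp only [pvEsc, if_neg hsp, List.cons_append, List.nil_append]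
    rw [pvFullmatch.eq_def]
    simp [hb, hd]

theorem pv_full_dot_nil (ps : List Char) : pvFullmatch ('.' :: ps) [] = false := by
  rw [pvFullmatch.eq_def]
  simp [show ('.' : Char) ≠ '\\' from by decide]

theorem pv_full_dot_cons (ps ds : List Char) (d : Char) :
    pvFullmatch ('.' :: ps) (d :: ds) = pvFullmatch ps ds := by
  rw [pvFullmatch.eq_def]
  simp [show ('.' : Char) ≠ '\\' from by decide]

theorem pv_full_pat : ∀ (L C : List Char), pvFullmatch (pvPat L) C = pvMid L C := by
  intro L
  induction L with
  | nil =>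
    intro C
    cases C with
    | nil => rfl
    | cons c cs => simp [pvPat, pvFullmatch, pvMid]
  | cons l L ih =>
    intro C
    by_cases hx : l = 'X' ∨ l = 'x'
    · simp only [pvPat, if_pos hx, List.cons_append, List.nil_append]
      cases C with
      | nil => simp [pv_full_dot_nil, pvMid]
      | cons c cs => rw [pv_full_dot_cons, pvMid_cons, if_pos hx, ih]
    · simp only [pvPat, if_neg hx]
      cases C with
      | nil => simp [pv_full_esc_nil, pvMid]
      | cons c cs =>
        rw [pv_full_esc_cons, pvMid_cons, if_neg hx]
        by_cases hc : c = l
        · subst hc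
          simp [ih]
        · rw [if_neg hc, if_pos (Ne.symm hc)]

-- ===== VERDICT =====
theorem label_matches_py_spec : Claim_equal_label_matches_py := by
  intro label current _
  unfold Spec_label_matches_py label_matches_py_alt
  rw [pv_A_eq_mid, pv_replace_filter, pv_replace_filter, pv_full_pat]
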